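-- pv_equiv track=rewrite | github.com/daniel-reich/turbo-robot | 2iQhC3t4SDZ6LGMWw_4.py | on_rectangle_bounds
-- ===== SOURCE A (Python) =====
-- def on_rectangle_bounds(points):
--     if len(points) < 3:
--         return True
--     X = [p[0] for p in points]
--     Y = [p[1] for p in points]
--     x_max, x_min, y_max, y_min = max(X), min(X), max(Y), min(Y)
--     X_inner = [p for p in points if x_min < p[0] < x_max]
--     if len(X_inner) > 0 and not all([p[1] in [y_min, y_max] for p in X_inner]):
--         return False
--     Y_inner = [p for p in points if y_min < p[1] < y_max]
--     if len(Y_inner) > 0 and not all([p[0] in [x_min, x_max] for p in Y_inner]):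
--         return False
--     return True
-- ===== SOURCE B (Python) =====
-- def on_rectangle_bounds(points):
--     if len(points) < 3:
--         return True
--     xs = {p[0] for p in points}
--     ys = {p[1] for p in points}
--
--     def strictly_between(v, s):
--         # v is a non-extreme value of s: some value below it and some above it
--         return any(w < v for w in s) and any(w > v for w in s)
--
--     return not any(strictly_between(p[0], xs) and strictly_between(p[1], ys)
--                    for p in points)
-- ===== Notes on version B (the rewrite author's own statement) =====
-- stated objective: alternative
-- what changed: Drops the bounding-box computation entirely: instead of min/max and two filtered boundary checks, B builds the distinct x- and y-coordinate sets and declares a point bad iff both its coordinates are strictly between other occurring values (exists-smaller and exists-larger), returning not-any-bad; equivalent because a coordinate is non-extreme exactly when some value lies below and some above it.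
import Mathlib
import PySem

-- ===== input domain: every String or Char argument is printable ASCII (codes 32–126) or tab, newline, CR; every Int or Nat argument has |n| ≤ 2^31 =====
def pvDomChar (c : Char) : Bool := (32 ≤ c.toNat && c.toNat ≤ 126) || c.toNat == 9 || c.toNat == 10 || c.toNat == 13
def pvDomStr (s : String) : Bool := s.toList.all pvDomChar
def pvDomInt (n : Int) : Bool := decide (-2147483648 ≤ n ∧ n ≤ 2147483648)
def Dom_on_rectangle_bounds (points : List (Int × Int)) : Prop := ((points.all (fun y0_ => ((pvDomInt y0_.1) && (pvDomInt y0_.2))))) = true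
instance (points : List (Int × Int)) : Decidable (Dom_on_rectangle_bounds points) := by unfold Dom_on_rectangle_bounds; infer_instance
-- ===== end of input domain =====

-- B drops A's min/max bounding box: it builds the distinct coordinate sets and flags a point iff both
-- coordinates have some occurring value strictly below and strictly above them; same values everywhere.

-- ===== PORT A =====
def on_rectangle_bounds (points : List (Int × Int)) : Bool :=
  if points.length < 3 then true
  else
    let X := points.map (fun p => p.1)
    let Y := points.map (fun p => p.2)
    -- max/min on a nonempty list (guard guarantees nonemptiness; .getD 0 is unreachable)
    let x_max := (PySem.List.max? X (fun x => x)).getD 0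
    let x_min := (PySem.List.min? X (fun x => x)).getD 0
    let y_max := (PySem.List.max? Y (fun y => y)).getD 0
    let y_min := (PySem.List.min? Y (fun y => y)).getD 0
    let X_inner := points.filter (fun p => x_min < p.1 && p.1 < x_max)
    if X_inner.length > 0 && !(X_inner.all (fun p => p.2 == y_min || p.2 == y_max)) then
      false
    else
      let Y_inner := points.filter (fun p => y_min < p.2 && p.2 < y_max)
      if Y_inner.length > 0 && !(Y_inner.all (fun p => p.1 == x_min || p.1 == x_max)) then
        false
      else true

-- ===== PORT B =====
-- any(w < v)/any(w > v) over a set: order-independent, so folding over the Set's element list is exact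
def pvStrictlyBetween (v : Int) (s : PySem.Set Int) : Bool :=
  s.any (fun w => w < v) && s.any (fun w => w > v)

def on_rectangle_bounds_alt (points : List (Int × Int)) : Bool :=
  if points.length < 3 then true
  else
    let xs := PySem.Set.ofList (points.map (fun p => p.1))
    let ys := PySem.Set.ofList (points.map (fun p => p.2))
    !(points.any (fun p => pvStrictlyBetween p.1 xs && pvStrictlyBetween p.2 ys))

-- ===== PRECONDITION & SPEC =====
def Spec_on_rectangle_bounds (points : List (Int × Int)) (out : Bool) : Prop := out = on_rectangle_bounds_alt points
instance (points : List (Int × Int)) (out : Bool) : Decidable (Spec_on_rectangle_bounds points out) := by unfold Spec_on_rectangle_bounds; infer_instance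

-- ===== CLAIM =====
def Claim_equal_on_rectangle_bounds : Prop := ∀ (points : List (Int × Int)), Dom_on_rectangle_bounds points → Spec_on_rectangle_bounds points (on_rectangle_bounds points)

-- ===== LEMMAS AND PROOFS =====

-- a list on which 'all' is false is nonempty
theorem pv_len_pos (c : List (Int × Int)) (q : Int × Int → Bool) (h : c.all q = false) : 0 < c.length := by
  cases c with
  | nil => simp at h
  | cons a t => simp

-- A's guarded test 'len>0 and not all(...)' collapses: the whole if-chain is the conjunction of the two all-checks.
theorem pv_guard_collapse (c1 c2 : List (Int × Int)) (q1 q2 : Int × Int → Bool) :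
    (if c1.length > 0 && !(c1.all q1) then false
     else if c2.length > 0 && !(c2.all q2) then false else true)
      = (c1.all q1 && c2.all q2) := by
  cases h1 : c1.all q1 with
  | false => simp [pv_len_pos _ _ h1]
  | true =>
    cases h2 : c2.all q2 with
    | false => simp [pv_len_pos _ _ h2]
    | true => simp

-- 'some value below v and some above v' over the distinct values of l ↔ min l < v < max l
theorem pv_between_iff (l : List Int) (m M v : Int)
    (hm : PySem.List.min? l (fun x => x) = some m)
    (hM : PySem.List.max? l (fun x => x) = some M) :
    (pvStrictlyBetween v (PySem.Set.ofList l) = true ↔ (m < v ∧ v < M)) := by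
  unfold pvStrictlyBetween
  simp only [Bool.and_eq_true, List.any_eq_true, PySem.Set.mem_ofList, decide_eq_true_eq]
  constructor
  · rintro ⟨⟨a, ha, hav⟩, ⟨b, hb, hbv⟩⟩
    have h1 := PySem.List.min?_isMin hm a ha
    have h2 := PySem.List.max?_isMax hM b hb
    simp only at h1 h2
    omega
  · rintro ⟨h1, h2⟩
    exact ⟨⟨m, PySem.List.min?_mem hm, h1⟩, ⟨M, PySem.List.max?_mem hM, h2⟩⟩

-- ===== VERDICT =====
theorem on_rectangle_bounds_spec : Claim_equal_on_rectangle_bounds := by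
  intro points _
  unfold Spec_on_rectangle_bounds on_rectangle_bounds on_rectangle_bounds_alt
  by_cases hlen : points.length < 3
  · simp [hlen]
  · simp only [hlen, if_false]
    have hne : points ≠ [] := by intro h; subst h; simp at hlen
    obtain ⟨xm, hxm⟩ : ∃ m, PySem.List.min? (points.map (fun p => p.1)) (fun x => x) = some m := by
      cases h : PySem.List.min? (points.map (fun p => p.1)) (fun x => x) with
      | none => exact absurd (List.map_eq_nil_iff.mp ((PySem.List.min?_eq_none_iff _ _).mp h)) hne
      | some m => exact ⟨m, rfl⟩
    obtain ⟨xM, hxM⟩ : ∃ m, PySem.List.max? (points.map (fun p => p.1)) (fun x => x) = some m := by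
      cases h : PySem.List.max? (points.map (fun p => p.1)) (fun x => x) with
      | none => exact absurd (List.map_eq_nil_iff.mp ((PySem.List.max?_eq_none_iff _ _).mp h)) hne
      | some m => exact ⟨m, rfl⟩
    obtain ⟨ym, hym⟩ : ∃ m, PySem.List.min? (points.map (fun p => p.2)) (fun x => x) = some m := by
      cases h : PySem.List.min? (points.map (fun p => p.2)) (fun x => x) with
      | none => exact absurd (List.map_eq_nil_iff.mp ((PySem.List.min?_eq_none_iff _ _).mp h)) hne
      | some m => exact ⟨m, rfl⟩
    obtain ⟨yM, hyM⟩ : ∃ m, PySem.List.max? (points.map (fun p => p.2)) (fun x => x) = some m := by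
      cases h : PySem.List.max? (points.map (fun p => p.2)) (fun x => x) with
      | none => exact absurd (List.map_eq_nil_iff.mp ((PySem.List.max?_eq_none_iff _ _).mp h)) hne
      | some m => exact ⟨m, rfl⟩
    simp only [hxm, hxM, hym, hyM, Option.getD_some]
    have hxlo : ∀ p ∈ points, xm ≤ p.1 := fun p hp =>
      PySem.List.min?_isMin hxm p.1 (List.mem_map_of_mem hp)
    have hxhi : ∀ p ∈ points, p.1 ≤ xM := fun p hp =>
      PySem.List.max?_isMax hxM p.1 (List.mem_map_of_mem hp)
    have hylo : ∀ p ∈ points, ym ≤ p.2 := fun p hp =>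
      PySem.List.min?_isMin hym p.2 (List.mem_map_of_mem hp)
    have hyhi : ∀ p ∈ points, p.2 ≤ yM := fun p hp =>
      PySem.List.max?_isMax hyM p.2 (List.mem_map_of_mem hp)
    rw [pv_guard_collapse]
    rw [Bool.eq_iff_iff]
    simp only [List.all_filter, Bool.and_eq_true, List.all_eq_true, Bool.not_eq_true',
      List.any_eq_false]
    constructor
    · rintro ⟨hA, hB⟩ p hp
      have e1 := hA p hp
      have e2 := hB p hp
      have hx := pv_between_iff _ _ _ p.1 hxm hxM
      have hy := pv_between_iff _ _ _ p.2 hym hyM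
      have h1 := hxlo p hp; have h2 := hxhi p hp
      have h3 := hylo p hp; have h4 := hyhi p hp
      simp only [Bool.or_eq_true, Bool.not_eq_true', Bool.and_eq_false_iff,
        decide_eq_false_iff_not, not_lt, beq_iff_eq] at e1 e2
      rintro ⟨hbx, hby⟩
      have hx' := hx.mp hbx
      have hy' := hy.mp hby
      omega
    · intro h
      refine ⟨fun p hp => ?_, fun p hp => ?_⟩ <;>
      · have e := h p hp
        have hx := pv_between_iff _ _ _ p.1 hxm hxM
        have hy := pv_between_iff _ _ _ p.2 hym hyM
        have h1 := hxlo p hp; have h2 := hxhi p hp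
        have h3 := hylo p hp; have h4 := hyhi p hp
        simp only [Bool.or_eq_true, Bool.not_eq_true', Bool.and_eq_false_iff,
          decide_eq_false_iff_not, not_lt, beq_iff_eq]
        by_cases cx : xm < p.1 ∧ p.1 < xM
        · by_cases cy : ym < p.2 ∧ p.2 < yM
          · exact absurd ⟨hx.mpr cx, hy.mpr cy⟩ e
          · omega
        · omega
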